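-- pv_equiv track=rewrite | github.com/DMamrenko/Kattis-Problems | card_trick.py | getAlphaOrder
-- ===== SOURCE A (Python) =====
-- master_string = 'abcdefghijklm'
--
-- def bottom(times, cards):
--     new = []
--     for i in range(times):
--         top = cards[0]
--         tail = cards[1:]
--         new = tail+top
--         cards = new
--     return new
--
-- def getAlphaOrder(numCards):
--     alphaList = master_string[:numCards]
--     order = []
--     for i in range(1, numCards+1):
--         if i == numCards:
--             order.append(alphaList[0])
--         else:
--             alphaList = bottom(i, alphaList)
--             order.append(alphaList[0])
--             alphaList = alphaList[1:]
--     return order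
-- ===== SOURCE B (Python) =====
-- master_string = 'abcdefghijklm'
--
-- def getAlphaOrder(numCards):
--     # Circular elimination with a modular cursor over a shrinking list,
--     # instead of rebuilding the rotated string character by character.
--     cards = list(master_string[:numCards])
--     order = []
--     idx = 0
--     for i in range(1, numCards + 1):
--         idx = (idx + i) % len(cards)
--         order.append(cards.pop(idx))
--         if cards:
--             idx %= len(cards)
--     return order
-- ===== Notes on version B (the rewrite author's own statement) =====
-- stated objective: alternative
-- what changed: B replaces A's nested character-by-character rotation (bottom) and repeated list rebuilding by a single circular-elimination pass with a modular cursor over a shrinking list.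
import Mathlib
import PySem

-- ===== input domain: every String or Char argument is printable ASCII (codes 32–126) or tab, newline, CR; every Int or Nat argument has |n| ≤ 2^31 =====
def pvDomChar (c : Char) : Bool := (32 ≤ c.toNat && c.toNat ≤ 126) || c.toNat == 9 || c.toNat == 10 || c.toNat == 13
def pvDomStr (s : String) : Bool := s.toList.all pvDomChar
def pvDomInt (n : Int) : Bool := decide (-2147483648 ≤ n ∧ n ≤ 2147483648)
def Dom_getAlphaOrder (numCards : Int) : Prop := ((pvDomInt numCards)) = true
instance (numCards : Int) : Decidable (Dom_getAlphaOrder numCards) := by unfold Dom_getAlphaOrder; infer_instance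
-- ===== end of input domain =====

-- B replaces A's nested rotation loop by one circular-elimination pass with a modular cursor (objective: alternative).

-- ===== PORT A =====
-- master_string = 'abcdefghijklm' (as a char list; strings are indexed/sliced char-wise)
def masterChars : List Char := ['a','b','c','d','e','f','g','h','i','j','k','l','m']

-- bottom(times, cards): state is (new, cards); Python's initial new = [] is returned when the loop is empty
def bottomPort (times : Int) (cards : List Char) : List Char :=
  ((PySem.List.pyRange 0 times 1).foldl (fun st _ =>
      match PySem.List.pyGet? st.2 0 with
      | some top =>
          let new := PySem.List.slice st.2 (some 1) none ++ [top]
          (new, new)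
      | none => st       -- IndexError in Python; excluded by Pre_
    ) (([] : List Char), cards)).1

def getAlphaOrder (numCards : Int) : List String :=
  let alphaList := PySem.List.slice masterChars none (some numCards)
  ((PySem.List.pyRange 1 (numCards + 1) 1).foldl (fun st i =>
      if i == numCards then
        match PySem.List.pyGet? st.1 0 with
        | some c => (st.1, st.2 ++ [String.ofList [c]])
        | none => st   -- IndexError in Python; excluded by Pre_
      else
        let a2 := bottomPort i st.1
        match PySem.List.pyGet? a2 0 with
        | some c => (PySem.List.slice a2 (some 1) none, st.2 ++ [String.ofList [c]])
        | none => (a2, st.2)   -- IndexError in Python; excluded by Pre_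
    ) (alphaList, ([] : List String))).2

-- ===== PORT B =====
def getAlphaOrder_alt (numCards : Int) : List String :=
  let cards := PySem.List.slice masterChars none (some numCards)
  (((PySem.List.pyRange 1 (numCards + 1) 1).foldl (fun st i =>
      let (cards, order, idx) := st
      if cards.length == 0 then st   -- ZeroDivisionError in Python; excluded by Pre_
      else
        let idx1 := PySem.Int.mod (idx + i) cards.length
        match PySem.List.pop? cards idx1 with
        | some (c, rest) =>
            (rest, order ++ [String.ofList [c]],
             if rest.length == 0 then idx1 else PySem.Int.mod idx1 rest.length)
        | none => st   -- unreachable: idx1 is in range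
    ) (cards, ([] : List String), (0 : Int))).2.1)

-- ===== PRECONDITION & SPEC =====
-- A raises IndexError (and B ZeroDivisionError) once the 13-card deck is exhausted, i.e. for numCards ≥ 14.
def Pre_getAlphaOrder (numCards : Int) : Prop := numCards ≤ 13
instance (numCards : Int) : Decidable (Pre_getAlphaOrder numCards) := by unfold Pre_getAlphaOrder; infer_instance
def pvWitness_getAlphaOrder : Int := 13
def Spec_getAlphaOrder (numCards : Int) (out : List String) : Prop := out = getAlphaOrder_alt numCards
instance (numCards : Int) (out : List String) : Decidable (Spec_getAlphaOrder numCards out) := by unfold Spec_getAlphaOrder; infer_instance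

-- ===== CLAIM (what is proved, stated in full; the proofs are below) =====
def Claim_equal_getAlphaOrder : Prop := ∀ (numCards : Int), Dom_getAlphaOrder numCards → Pre_getAlphaOrder numCards → Spec_getAlphaOrder numCards (getAlphaOrder numCards)

-- ===== LEMMAS AND PROOFS =====

theorem getAlphaOrder_empty_of_nonpos (n : Int) (h : n ≤ 0) : getAlphaOrder n = [] := by
  unfold getAlphaOrder
  rw [PySem.List.pyRange_one_eq_nil (by omega)]
  rfl

theorem getAlphaOrder_alt_empty_of_nonpos (n : Int) (h : n ≤ 0) : getAlphaOrder_alt n = [] := by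
  unfold getAlphaOrder_alt
  rw [PySem.List.pyRange_one_eq_nil (by omega)]
  rfl

-- ===== VERDICT (by name: the statement is the Claim_ definition above) =====
set_option maxRecDepth 10000 in
theorem getAlphaOrder_spec : Claim_equal_getAlphaOrder := by
  intro n _ hpre
  unfold Spec_getAlphaOrder
  by_cases h0 : n ≤ 0
  · rw [getAlphaOrder_empty_of_nonpos n h0, getAlphaOrder_alt_empty_of_nonpos n h0]
  · have h1 : 1 ≤ n := by omega
    unfold Pre_getAlphaOrder at hpre
    interval_cases n <;> decide
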